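-- pv_equiv track=rewrite | github.com/thotho19/python_findS_algorithm | finds.py | nestedListsChecker
-- ===== SOURCE A (Python) =====
-- def nestedListsChecker(data): # this function to check the length of each nested lists inside data
--     lenSize = len(data[0]) #init length
--     comparingState = True #init boolean variable
--     for d in data:
--         if lenSize != len(d): #if the nested lists length is not equail then false
--             comparingState = False
--         else:                #else do nothing
--             pass
--     return comparingState  #return the boolean
-- ===== SOURCE B (Python) =====
-- def nestedListsChecker(data):
--     # B: collect the distinct nested-list lengths into a set and check its cardinality,
--     # instead of comparing each against a reference length with a flag.
--     return len({len(d) for d in data}) <= 1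
-- ===== Notes on version B (the rewrite author's own statement) =====
-- stated objective: simpler
-- what changed: Replaces the reference-length-plus-boolean-flag loop with building the set of distinct nested-list lengths and deciding by its cardinality (<= 1); Pre_ excludes only empty data, where A raises IndexError at data[0].
import Mathlib
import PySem

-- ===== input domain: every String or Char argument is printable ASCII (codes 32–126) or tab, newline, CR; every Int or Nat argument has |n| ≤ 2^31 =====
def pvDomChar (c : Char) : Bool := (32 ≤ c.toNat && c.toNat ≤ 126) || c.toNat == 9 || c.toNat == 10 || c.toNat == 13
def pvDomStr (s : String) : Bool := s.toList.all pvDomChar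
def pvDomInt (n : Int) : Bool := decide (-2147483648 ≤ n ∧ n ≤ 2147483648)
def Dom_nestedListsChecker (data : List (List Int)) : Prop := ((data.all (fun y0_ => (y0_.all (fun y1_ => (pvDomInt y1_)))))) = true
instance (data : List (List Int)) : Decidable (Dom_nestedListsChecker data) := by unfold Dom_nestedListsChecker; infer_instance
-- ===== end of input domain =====

-- B replaces A's reference-length + boolean-flag loop with the set of distinct lengths,
-- decided by its cardinality (objective: simpler).

-- ===== PORT A =====
def nestedListsChecker (data : List (List Int)) : Bool :=
  -- lenSize = len(data[0]); data[0] raises IndexError on empty data (excluded by Pre_)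
  let lenSize : Int := ((PySem.List.pyGet? data 0).getD []).length
  -- for d in data: if lenSize != len(d): comparingState = False
  data.foldl (fun comparingState d =>
    if lenSize ≠ (d.length : Int) then false else comparingState) true

-- ===== PORT B =====
def nestedListsChecker_alt (data : List (List Int)) : Bool :=
  -- len({len(d) for d in data}) <= 1
  decide ((PySem.Set.ofList (data.map (fun d => (d.length : Int)))).length ≤ 1)

-- ===== PRECONDITION & SPEC =====
-- Pre_ excludes only empty data, on which A raises IndexError at data[0].
def Pre_nestedListsChecker (data : List (List Int)) : Prop := data ≠ []
instance (data : List (List Int)) : Decidable (Pre_nestedListsChecker data) := by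
  unfold Pre_nestedListsChecker; infer_instance

def pvWitness_nestedListsChecker : List (List Int) := [[1, 2], [3, 4]]

def Spec_nestedListsChecker (data : List (List Int)) (out : Bool) : Prop := out = nestedListsChecker_alt data
instance (data : List (List Int)) (out : Bool) : Decidable (Spec_nestedListsChecker data out) := by unfold Spec_nestedListsChecker; infer_instance

-- ===== CLAIM (what is proved, stated in full; the proofs are below) =====
def Claim_equal_nestedListsChecker : Prop := ∀ (data : List (List Int)), Dom_nestedListsChecker data → Pre_nestedListsChecker data → Spec_nestedListsChecker data (nestedListsChecker data)

-- ===== LEMMAS AND PROOFS =====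

-- A's flag loop computes: initial flag AND every length equals the reference length.
theorem foldA_eq_all (L : Int) (l : List (List Int)) (b : Bool) :
    l.foldl (fun comparingState d =>
      if L ≠ (d.length : Int) then false else comparingState) b
      = (b && l.all (fun d => decide ((d.length : Int) = L))) := by
  induction l generalizing b with
  | nil => simp
  | cons a t ih =>
    simp only [List.foldl_cons, List.all_cons, ih]
    by_cases h : L = (a.length : Int)
    · simp [h]
    · have h2 : ¬ ((a.length : Int) = L) := fun e => h e.symm
      simp [h, h2]

theorem length_le_one_of_nodup_of_eq {α : Type} (l : List α) (x : α)
    (hn : l.Nodup) (h : ∀ a ∈ l, a = x) : l.length ≤ 1 := by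
  match l with
  | [] => simp
  | [a] => simp
  | a :: b :: t =>
    exfalso
    have ha := h a (by simp)
    have hb := h b (by simp)
    subst ha
    rw [hb] at hn
    simp at hn

theorem eq_of_length_le_one {α : Type} (l : List α) (a b : α)
    (hl : l.length ≤ 1) (ha : a ∈ l) (hb : b ∈ l) : a = b := by
  match l with
  | [] => simp at ha
  | [c] => simp at ha hb; rw [ha, hb]
  | c :: d :: t => simp at hl

-- the distinct-lengths set of a nonempty list has ≤ 1 element iff every tail length equals the head's
theorem ofList_cons_length_le_one (x : Int) (xs : List Int) :
    ((PySem.Set.ofList (x :: xs)).length ≤ 1) ↔ ∀ y ∈ xs, y = x := by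
  constructor
  · intro h y hy
    exact eq_of_length_le_one _ y x h
      (by rw [PySem.Set.mem_ofList]; simp [hy])
      (by rw [PySem.Set.mem_ofList]; simp)
  · intro h
    apply length_le_one_of_nodup_of_eq _ x (PySem.Set.nodup_ofList _)
    intro a ha
    rw [PySem.Set.mem_ofList, List.mem_cons] at ha
    rcases ha with ha | ha
    · exact ha
    · exact h a ha

-- ===== VERDICT (by name: the statement is the Claim_ definition above) =====
theorem nestedListsChecker_spec : Claim_equal_nestedListsChecker := by
  intro data _ hpre
  unfold Spec_nestedListsChecker nestedListsChecker nestedListsChecker_alt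
  match data with
  | [] => exact absurd rfl hpre
  | d0 :: rest =>
    rw [PySem.List.pyGet?_zero_cons, Option.getD_some, foldA_eq_all, Bool.eq_iff_iff]
    simp only [Bool.true_and, List.all_eq_true, decide_eq_true_eq, List.map_cons,
      ofList_cons_length_le_one, List.mem_map]
    constructor
    · rintro h y ⟨d, hd, rfl⟩
      exact_mod_cast h d (by simp [hd])
    · intro h d hd
      rw [List.mem_cons] at hd
      rcases hd with hd | hd
      · simp [hd]
      · exact_mod_cast h (d.length : Int) ⟨d, hd, rfl⟩
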